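-- pv_equiv track=rewrite | github.com/fariedgunawan/TBA | parser.py | isPredikat
-- ===== SOURCE A (Python) =====
-- def isPredikat(word: str) -> bool:
--     # Predikat = {'makan', 'minum', 'baca', 'tulis', 'lihat'}
--     currState = 0
--     for letter in word:
--         match currState:
--             case -1: break
--             case 0:
--                 if letter == 'm': currState = 1
--                 elif letter == 'b': currState = 2
--                 elif letter == 't': currState = 3
--                 elif letter == 'l': currState = 4
--                 else: currState = -1
--             case 1:
--                 if letter == 'a': currState = 5
--                 elif letter == 'i': currState = 6
--                 else: currState = -1
--             case 2: currState = 7 if letter == 'a' else -1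
--             case 7: currState = 12 if letter == 'c' else -1
--             case 12: currState = 17 if letter == 'a' else -1
--             case 17: currState = 17 if letter == ' ' else -1 #Final State
--             case 3: currState = 8 if letter == 'u' else -1
--             case 8: currState = 13 if letter == 'l' else -1
--             case 13: currState = 18 if letter == 'i' else -1
--             case 18: currState = 22 if letter == 's' else -1
--             case 22: currState = 22 if letter == ' ' else -1 #FINAL STATE
--             case 4: currState = 9 if letter == 'i' else -1
--             case 9: currState = 14 if letter == 'h' else -1
--             case 14: currState = 19 if letter == 'a' else -1
--             case 19: currState = 23 if letter == 't' else -1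
--             case 23: currState = 23 if letter == ' ' else -1 #FINAL STATE
--             case 5: currState = 10 if letter == 'k' else -1
--             case 10: currState = 15 if letter == 'a' else -1
--             case 15: currState = 20 if letter == 'n' else -1
--             case 20: currState = 20 if letter == ' ' else -1 #Final state
--             case 6: currState = 11 if letter == 'n' else -1
--             case 11: currState = 16 if letter == 'u' else -1
--             case 16: currState = 21 if letter == 'm' else -1
--             case 21: currState = 21 if letter == ' ' else -1 #Final State
--     return currState == 17 or currState == 22 or currState == 23 or currState == 20 or currState == 21
-- ===== SOURCE B (Python) =====
-- PREDIKAT = {'makan', 'minum', 'baca', 'tulis', 'lihat'}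
--
-- def isPredikat(word: str) -> bool:
--     return word.rstrip(' ') in PREDIKAT
-- ===== Notes on version B (the rewrite author's own statement) =====
-- stated objective: simpler
-- what changed: Replaced the hand-written 24-state DFA loop with a one-liner: strip only trailing space characters via rstrip and test membership in the literal set of the five accepted words.
import Mathlib
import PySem

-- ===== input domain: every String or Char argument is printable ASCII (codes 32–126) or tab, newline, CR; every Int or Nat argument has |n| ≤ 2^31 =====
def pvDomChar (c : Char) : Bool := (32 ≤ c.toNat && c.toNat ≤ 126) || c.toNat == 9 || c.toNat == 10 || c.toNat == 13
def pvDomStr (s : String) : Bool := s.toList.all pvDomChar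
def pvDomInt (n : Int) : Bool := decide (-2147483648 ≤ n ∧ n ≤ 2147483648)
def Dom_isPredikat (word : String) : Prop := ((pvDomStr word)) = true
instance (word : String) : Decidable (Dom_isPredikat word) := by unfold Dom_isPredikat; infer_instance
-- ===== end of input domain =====

-- B replaces A's hand-written 24-state DFA loop with "strip trailing space characters, then membership
-- in the literal set of the five accepted words" (objective: simpler).

-- ===== PORT A =====
-- one loop step of A's `match currState` (the `case -1: break` is absorbing: once at -1 the
-- remaining letters cannot change the state, so staying at -1 yields the same final state)
def pvStep (s : Int) (letter : Char) : Int :=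
  match s with
  | -1 => -1
  | 0 => if letter = 'm' then 1 else if letter = 'b' then 2
         else if letter = 't' then 3 else if letter = 'l' then 4 else -1
  | 1 => if letter = 'a' then 5 else if letter = 'i' then 6 else -1
  | 2 => if letter = 'a' then 7 else -1
  | 7 => if letter = 'c' then 12 else -1
  | 12 => if letter = 'a' then 17 else -1
  | 17 => if letter = ' ' then 17 else -1
  | 3 => if letter = 'u' then 8 else -1
  | 8 => if letter = 'l' then 13 else -1
  | 13 => if letter = 'i' then 18 else -1
  | 18 => if letter = 's' then 22 else -1
  | 22 => if letter = ' ' then 22 else -1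
  | 4 => if letter = 'i' then 9 else -1
  | 9 => if letter = 'h' then 14 else -1
  | 14 => if letter = 'a' then 19 else -1
  | 19 => if letter = 't' then 23 else -1
  | 23 => if letter = ' ' then 23 else -1
  | 5 => if letter = 'k' then 10 else -1
  | 10 => if letter = 'a' then 15 else -1
  | 15 => if letter = 'n' then 20 else -1
  | 20 => if letter = ' ' then 20 else -1
  | 6 => if letter = 'n' then 11 else -1
  | 11 => if letter = 'u' then 16 else -1
  | 16 => if letter = 'm' then 21 else -1
  | 21 => if letter = ' ' then 21 else -1
  | _ => -1

def isPredikat (word : String) : Bool :=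
  let currState := word.toList.foldl pvStep 0
  decide (currState = 17 ∨ currState = 22 ∨ currState = 23 ∨ currState = 20 ∨ currState = 21)

-- ===== PORT B =====
-- word.rstrip with the space character as argument: drop trailing spaces only (exact: reverse, dropWhile, reverse)
def pvRstripSp (l : List Char) : List Char := (l.reverse.dropWhile (· == ' ')).reverse

def isPredikat_alt (word : String) : Bool :=
  [ "makan".toList, "minum".toList, "baca".toList, "tulis".toList, "lihat".toList
  ].contains (pvRstripSp word.toList)

-- ===== PRECONDITION & SPEC =====
def Spec_isPredikat (word : String) (out : Bool) : Prop := out = isPredikat_alt word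
instance (word : String) (out : Bool) : Decidable (Spec_isPredikat word out) := by unfold Spec_isPredikat; infer_instance

-- ===== CLAIM (what is proved, stated in full; the proofs are below) =====
def Claim_equal_isPredikat : Prop := ∀ (word : String), Dom_isPredikat word → Spec_isPredikat word (isPredikat word)

-- ===== LEMMAS AND PROOFS =====

-- the states A can ever be in
def pvStates : List Int := [-1,0,1,2,3,4,5,6,7,8,9,10,11,12,13,14,15,16,17,18,19,20,21,22,23]

-- residual languages: from state s the rest of the input is accepted iff it is one of these words followed by trailing spaces
def pvSuf (s : Int) : List (List Char) :=
  match s with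
  | 0 => [['m','a','k','a','n'], ['m','i','n','u','m'], ['b','a','c','a'],
          ['t','u','l','i','s'], ['l','i','h','a','t']]
  | 1 => [['a','k','a','n'], ['i','n','u','m']]
  | 2 => [['a','c','a']]
  | 3 => [['u','l','i','s']]
  | 4 => [['i','h','a','t']]
  | 5 => [['k','a','n']]
  | 6 => [['n','u','m']]
  | 7 => [['c','a']]
  | 8 => [['l','i','s']]
  | 9 => [['h','a','t']]
  | 10 => [['a','n']]
  | 11 => [['u','m']]
  | 12 => [['a']]
  | 13 => [['i','s']]
  | 14 => [['a','t']]
  | 15 => [['n']]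
  | 16 => [['m']]
  | 18 => [['s']]
  | 19 => [['t']]
  | 17 | 20 | 21 | 22 | 23 => [[]]
  | _ => []

def pvFinal (s : Int) : Bool :=
  decide (s = 17 ∨ s = 22 ∨ s = 23 ∨ s = 20 ∨ s = 21)

theorem pvRstripSp_cons (c : Char) (l : List Char) :
    pvRstripSp (c :: l) = if c = ' ' ∧ pvRstripSp l = [] then [] else c :: pvRstripSp l := by
  simp only [pvRstripSp, List.reverse_cons, List.dropWhile_append]
  by_cases h : (l.reverse.dropWhile (· == ' ')) = []
  · by_cases hc : c = ' ' <;>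
      simp [h, hc]
  · have hne : ¬(c = ' ' ∧ (l.reverse.dropWhile (· == ' ')).reverse = []) := by
      rintro ⟨_, hr⟩
      exact h (by simpa using List.reverse_eq_nil_iff.mp hr)
    simp [h, List.isEmpty_iff]

theorem pvStep_mem (s : Int) (c : Char) (hs : s ∈ pvStates) : pvStep s c ∈ pvStates := by
  simp only [pvStates, List.mem_cons, List.not_mem_nil, or_false] at hs
  rcases hs with rfl|rfl|rfl|rfl|rfl|rfl|rfl|rfl|rfl|rfl|rfl|rfl|rfl|rfl|rfl|rfl|rfl|rfl|rfl|rfl|rfl|rfl|rfl|rfl|rfl <;>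
    first
      | (simp only [pvStep]; split_ifs <;> decide)
      | (simp only [pvStep]; decide)

theorem pvSuf_step (s : Int) (c : Char) (l : List Char) (hs : s ∈ pvStates) :
    (pvSuf s).contains (pvRstripSp (c :: l)) = (pvSuf (pvStep s c)).contains (pvRstripSp l) := by
  rw [pvRstripSp_cons]
  simp only [pvStates, List.mem_cons, List.not_mem_nil, or_false] at hs
  rcases hs with rfl|rfl|rfl|rfl|rfl|rfl|rfl|rfl|rfl|rfl|rfl|rfl|rfl|rfl|rfl|rfl|rfl|rfl|rfl|rfl|rfl|rfl|rfl|rfl|rfl <;>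
    (simp only [pvStep]; split_ifs <;> simp_all [pvSuf])

theorem pvMain (l : List Char) (s : Int) (hs : s ∈ pvStates) :
    pvFinal (l.foldl pvStep s) = (pvSuf s).contains (pvRstripSp l) := by
  induction l generalizing s with
  | nil =>
      simp only [pvStates, List.mem_cons, List.not_mem_nil, or_false] at hs
      rcases hs with rfl|rfl|rfl|rfl|rfl|rfl|rfl|rfl|rfl|rfl|rfl|rfl|rfl|rfl|rfl|rfl|rfl|rfl|rfl|rfl|rfl|rfl|rfl|rfl|rfl <;> decide
  | cons c l ih =>
      rw [List.foldl_cons, ih (pvStep s c) (pvStep_mem s c hs), pvSuf_step s c l hs]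

theorem isPredikat_equal (word : String) : isPredikat word = isPredikat_alt word := by
  have h := pvMain word.toList 0 (by decide)
  have e : pvSuf 0 = ["makan".toList, "minum".toList, "baca".toList, "tulis".toList, "lihat".toList] := by
    decide
  rw [e] at h
  simpa [isPredikat, isPredikat_alt, pvFinal] using h

-- ===== VERDICT (by name: the statement is the Claim_ definition above) =====
theorem isPredikat_spec : Claim_equal_isPredikat := by
  intro word _
  exact isPredikat_equal word
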